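-- pv_equiv track=rewrite | github.com/lucastsui/collatz-research | spectral_computation.py | subgroup_size
-- ===== SOURCE A (Python) =====
-- def subgroup_size(p):
--     """Compute |<2,3>| in (Z/pZ)*."""
--     # Generate elements by multiplying by 2 and 3
--     seen = {1}
--     frontier = {1}
--     while frontier:
--         new = set()
--         for x in frontier:
--             for g in [2, 3]:
--                 y = (x * g) % p
--                 if y not in seen:
--                     seen.add(y)
--                     new.add(y)
--         frontier = new
--     return len(seen)
-- ===== SOURCE B (Python) =====
-- def subgroup_size(p):
--     """Compute |<2,3>| in (Z/pZ)*: the orbit of 1 under *2 and *3 mod p is the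
--     union of the doubling chains started at each element of the *3 chain of 1."""
--     seen = set()
--     starts = set()
--     t = 1
--     while t not in starts:
--         starts.add(t)
--         x = t
--         while x not in seen:
--             seen.add(x)
--             x = x * 2 % p
--         t = t * 3 % p
--     return len(seen)
-- ===== Notes on version B (the rewrite author's own statement) =====
-- stated objective: alternative
-- what changed: A saturates the orbit of 1 under x->2x%p and x->3x%p by level-by-level BFS with frontier sets; B instead walks the *3-chain of 1 (collecting it in 'starts') and, for each chain element, extends 'seen' by its doubling chain until it re-enters 'seen', using commutativity of modular multiplication to cover the whole orbit.
import Mathlib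
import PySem

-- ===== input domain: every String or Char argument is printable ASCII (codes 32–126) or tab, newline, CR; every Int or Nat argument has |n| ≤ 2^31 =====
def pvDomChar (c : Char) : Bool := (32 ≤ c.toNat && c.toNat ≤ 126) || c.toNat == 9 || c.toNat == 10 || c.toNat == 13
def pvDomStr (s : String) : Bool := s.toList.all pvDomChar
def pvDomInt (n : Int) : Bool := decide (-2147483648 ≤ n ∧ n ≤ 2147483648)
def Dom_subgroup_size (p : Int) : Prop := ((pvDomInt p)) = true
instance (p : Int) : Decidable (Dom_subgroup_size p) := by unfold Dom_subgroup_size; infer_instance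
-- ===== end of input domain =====

-- B replaces A's level-by-level BFS saturation of the orbit of 1 under x->2x%p, x->3x%p
-- by walking the *3-chain of 1 and extending seen with the doubling chain of each chain element
-- (same orbit by commutativity of modular multiplication); alternative algorithm, not faster.
-- Python's sets are ported as Std.HashSet Int (exact for the operations used: add, membership, len);
-- the 'while' loops carry fuel |p|+2, proved sufficient below.

-- ===== PORT A =====
-- inner 'for g in [2,3]' body of A's round
def pvStepA (p : Int) (acc : Std.HashSet Int × Std.HashSet Int) (x : Int) :
    Std.HashSet Int × Std.HashSet Int :=
  [(2 : Int), 3].foldl (fun acc g =>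
    let y := PySem.Int.mod (x * g) p
    if acc.1.contains y then acc
    else (acc.1.insert y, acc.2.insert y)) acc

-- A's 'while frontier' loop
def pvLoopA (p : Int) : Nat → Std.HashSet Int → Std.HashSet Int → Std.HashSet Int
  | 0, seen, _ => seen
  | n + 1, seen, frontier =>
    if frontier.isEmpty then seen
    else
      let r := frontier.fold (pvStepA p) (seen, (∅ : Std.HashSet Int))
      pvLoopA p n r.1 r.2

def subgroup_size (p : Int) : Int :=
  ((pvLoopA p (p.natAbs + 2) ((∅ : Std.HashSet Int).insert 1)
      ((∅ : Std.HashSet Int).insert 1)).size : Int)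

-- ===== PORT B =====
-- B's inner 'while x not in seen' doubling walk
def pvWalkB (p : Int) : Nat → Std.HashSet Int → Int → Std.HashSet Int
  | 0, seen, _ => seen
  | n + 1, seen, x =>
    if seen.contains x then seen
    else pvWalkB p n (seen.insert x) (PySem.Int.mod (x * 2) p)

-- B's outer 'while t not in starts' loop over the *3-chain of 1
def pvLoopB (p : Int) : Nat → Std.HashSet Int → Std.HashSet Int → Int → Std.HashSet Int
  | 0, seen, _, _ => seen
  | n + 1, seen, starts, t =>
    if starts.contains t then seen
    else pvLoopB p n (pvWalkB p (p.natAbs + 2) seen t)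
           (starts.insert t) (PySem.Int.mod (t * 3) p)

def subgroup_size_alt (p : Int) : Int :=
  ((pvLoopB p (p.natAbs + 2) (∅ : Std.HashSet Int) (∅ : Std.HashSet Int) 1).size : Int)

-- ===== PRECONDITION & SPEC =====
-- Pre_ excludes only p = 0, where A raises ZeroDivisionError at '(x * g) % p' (and B raises too).
def Pre_subgroup_size (p : Int) : Prop := p ≠ 0
instance (p : Int) : Decidable (Pre_subgroup_size p) := by unfold Pre_subgroup_size; infer_instance
def pvWitness_subgroup_size : Int := 5

def Spec_subgroup_size (p : Int) (out : Int) : Prop := out = subgroup_size_alt p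
instance (p : Int) (out : Int) : Decidable (Spec_subgroup_size p out) := by unfold Spec_subgroup_size; infer_instance

-- ===== CLAIM (what is proved, stated in full; the proofs are below) =====
def Claim_equal_subgroup_size : Prop :=
  ∀ (p : Int), Dom_subgroup_size p → Pre_subgroup_size p → Spec_subgroup_size p (subgroup_size p)

-- ===== LEMMAS AND PROOFS =====

-- the orbit of 1 under multiplication by 2 and by 3 mod p (what both programs enumerate)
inductive pvReach (p : Int) : Int → Prop
  | one : pvReach p 1
  | two {x : Int} : pvReach p x → pvReach p (PySem.Int.mod (x * 2) p)
  | three {x : Int} : pvReach p x → pvReach p (PySem.Int.mod (x * 3) p)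

-- all values either program can ever hold: 1 and the residues mod p
def pvAllowed (p : Int) : Finset Int :=
  insert 1 ((Finset.range p.natAbs).image (fun i : Nat => if 0 < p then (i : Int) else -(i : Int)))

lemma pvCard_allowed (p : Int) : (pvAllowed p).card ≤ p.natAbs + 1 := by
  classical
  refine le_trans (Finset.card_insert_le _ _) ?_
  have h := Finset.card_image_le (s := Finset.range p.natAbs)
    (f := fun i : Nat => if 0 < p then (i : Int) else -(i : Int))
  simp only [Finset.card_range] at h
  omega

lemma pvMod_mem_allowed {p : Int} (hp : p ≠ 0) (a : Int) : PySem.Int.mod a p ∈ pvAllowed p := by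
  classical
  rcases lt_trichotomy 0 p with h | h | h
  · have h0 : 0 ≤ PySem.Int.mod a p := PySem.Int.mod_nonneg a h
    have h1 : PySem.Int.mod a p < p := PySem.Int.mod_lt a h
    refine Finset.mem_insert_of_mem (Finset.mem_image.mpr ⟨(PySem.Int.mod a p).toNat, ?_, ?_⟩)
    · refine Finset.mem_range.mpr ?_; omega
    · simp only [if_pos h]; omega
  · exact absurd h.symm hp
  · obtain ⟨h0, h1⟩ := PySem.Int.mod_neg_bounds a h
    refine Finset.mem_insert_of_mem (Finset.mem_image.mpr ⟨(-(PySem.Int.mod a p)).toNat, ?_, ?_⟩)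
    · refine Finset.mem_range.mpr ?_; omega
    · simp only [if_neg (by omega : ¬ 0 < p)]; omega

lemma pvOne_mem_allowed (p : Int) : (1 : Int) ∈ pvAllowed p := by
  simp [pvAllowed]

lemma pvToList_nodup (s : Std.HashSet Int) : s.toList.Nodup := by
  have h := Std.HashSet.distinct_toList (m := s)
  exact h.imp (by intro a b hb; simpa using hb)

lemma pvLen_le {p : Int} {l : List Int} (hn : l.Nodup) (hs : ∀ x ∈ l, x ∈ pvAllowed p) :
    l.length ≤ p.natAbs + 1 := by
  classical
  have hsub : l.toFinset ⊆ pvAllowed p := fun x hx => hs x (List.mem_toFinset.mp hx)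
  have hc := Finset.card_le_card hsub
  rw [List.toFinset_card_of_nodup hn] at hc
  exact le_trans hc (pvCard_allowed p)

lemma pvSize_le {p : Int} {s : Std.HashSet Int} (hall : ∀ y ∈ s, y ∈ pvAllowed p) :
    s.size ≤ p.natAbs + 1 := by
  rw [← Std.HashSet.length_toList]
  exact pvLen_le (pvToList_nodup s) (fun x hx => hall x (Std.HashSet.mem_toList.mp hx))

lemma pvMemInsert (s : Std.HashSet Int) (x y : Int) : y ∈ s.insert x ↔ y ∈ s ∨ y = x := by
  rw [Std.HashSet.mem_insert, beq_iff_eq]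
  constructor
  · rintro (h | h)
    · exact Or.inr h.symm
    · exact Or.inl h
  · rintro (h | h)
    · exact Or.inr h
    · exact Or.inl h.symm

lemma pvSizeInsert {s : Std.HashSet Int} {x : Int} (hx : x ∉ s) :
    (s.insert x).size = s.size + 1 := by
  simp [Std.HashSet.size_insert, hx]

lemma pvMod_congr {p x y : Int} (hp : p ≠ 0) (h : p ∣ x - y) :
    PySem.Int.mod x p = PySem.Int.mod y p := by
  have e1 := PySem.Int.floordiv_mul_add_mod x p
  have e2 := PySem.Int.floordiv_mul_add_mod y p
  have hdvd : |p| ∣ PySem.Int.mod x p - PySem.Int.mod y p := by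
    rw [abs_dvd]
    obtain ⟨k, hk⟩ := h
    exact ⟨k - PySem.Int.floordiv x p + PySem.Int.floordiv y p, by linear_combination e1 - e2 + hk⟩
  have habs : |PySem.Int.mod x p - PySem.Int.mod y p| < |p| := by
    rcases lt_trichotomy 0 p with hpos | h0 | hneg
    · have b1 : 0 ≤ PySem.Int.mod x p := PySem.Int.mod_nonneg x hpos
      have b2 : PySem.Int.mod x p < p := PySem.Int.mod_lt x hpos
      have b3 : 0 ≤ PySem.Int.mod y p := PySem.Int.mod_nonneg y hpos
      have b4 : PySem.Int.mod y p < p := PySem.Int.mod_lt y hpos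
      rw [abs_of_pos hpos]; rw [abs_lt]; omega
    · exact absurd h0.symm hp
    · obtain ⟨b1, b2⟩ := PySem.Int.mod_neg_bounds x hneg
      obtain ⟨b3, b4⟩ := PySem.Int.mod_neg_bounds y hneg
      rw [abs_of_neg hneg]; rw [abs_lt]; omega
  have := Int.eq_zero_of_abs_lt_dvd hdvd habs
  omega

lemma pvMod_mul {p : Int} (hp : p ≠ 0) (a k : Int) :
    PySem.Int.mod (PySem.Int.mod a p * k) p = PySem.Int.mod (a * k) p := by
  refine pvMod_congr hp ?_
  have e := PySem.Int.floordiv_mul_add_mod a p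
  exact ⟨-(PySem.Int.floordiv a p * k), by linear_combination k * e⟩

-- doubling step
def pvF2 (p : Int) : Int → Int := fun y => PySem.Int.mod (y * 2) p

lemma pvComm {p : Int} (hp : p ≠ 0) (x : Int) :
    PySem.Int.mod (pvF2 p x * 3) p = pvF2 p (PySem.Int.mod (x * 3) p) := by
  show PySem.Int.mod (PySem.Int.mod (x * 2) p * 3) p
      = PySem.Int.mod (PySem.Int.mod (x * 3) p * 2) p
  rw [pvMod_mul hp, pvMod_mul hp]
  ring_nf

lemma pvM3_iter2 {p : Int} (hp : p ≠ 0) (a : Nat) (x : Int) :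
    PySem.Int.mod ((pvF2 p)^[a] x * 3) p = (pvF2 p)^[a] (PySem.Int.mod (x * 3) p) := by
  induction a generalizing x with
  | zero => simp
  | succ a ih =>
    rw [Function.iterate_succ_apply, Function.iterate_succ_apply, ih (pvF2 p x), pvComm hp]

lemma pvIter2_mem {p : Int} {s : Std.HashSet Int} (hcl : ∀ y ∈ s, pvF2 p y ∈ s) {x : Int}
    (hx : x ∈ s) (a : Nat) : (pvF2 p)^[a] x ∈ s := by
  induction a generalizing x with
  | zero => simpa using hx
  | succ a ih => rw [Function.iterate_succ_apply]; exact ih (hcl x hx)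

-- a set containing 1 and closed under both steps contains the whole orbit
lemma pvComplete {p : Int} {s : Std.HashSet Int} (h1 : (1 : Int) ∈ s)
    (h2 : ∀ y ∈ s, PySem.Int.mod (y * 2) p ∈ s)
    (h3 : ∀ y ∈ s, PySem.Int.mod (y * 3) p ∈ s) :
    ∀ y, pvReach p y → y ∈ s := by
  intro y hy
  induction hy with
  | one => exact h1
  | two _ ih => exact h2 _ ih
  | three _ ih => exact h3 _ ih

-- ===== A-side lemmas =====

-- 'add y to seen and new if unseen' step of A, as a function of the pair
def pvTryAdd (acc : Std.HashSet Int × Std.HashSet Int) (y : Int) :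
    Std.HashSet Int × Std.HashSet Int :=
  if acc.1.contains y then acc else (acc.1.insert y, acc.2.insert y)

lemma pvStepA_eq (p : Int) (acc : Std.HashSet Int × Std.HashSet Int) (x : Int) :
    pvStepA p acc x
      = pvTryAdd (pvTryAdd acc (PySem.Int.mod (x * 2) p)) (PySem.Int.mod (x * 3) p) := rfl

lemma pvTryAdd_spec (s nw : Std.HashSet Int) (y : Int) :
    ∃ d0 : List Int,
      (∀ z, z ∈ (pvTryAdd (s, nw) y).1 ↔ z ∈ s ∨ z ∈ d0) ∧
      (∀ z, z ∈ (pvTryAdd (s, nw) y).2 ↔ z ∈ nw ∨ z ∈ d0) ∧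
      d0.Nodup ∧ (∀ z ∈ d0, z ∉ s) ∧
      (pvTryAdd (s, nw) y).1.size = s.size + d0.length ∧
      y ∈ (pvTryAdd (s, nw) y).1 ∧ (∀ z ∈ d0, z = y) := by
  by_cases hy : y ∈ s
  · have hc : s.contains y = true := Std.HashSet.contains_iff_mem.mpr hy
    have he : pvTryAdd (s, nw) y = (s, nw) := by simp [pvTryAdd, hc]
    rw [he]
    exact ⟨[], by simp, by simp, by simp, by simp, by simp, hy, by simp⟩
  · have hc : s.contains y = false := by
      simpa using fun h => hy (Std.HashSet.contains_iff_mem.mp h)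
    have he : pvTryAdd (s, nw) y = (s.insert y, nw.insert y) := by simp [pvTryAdd, hc]
    rw [he]
    refine ⟨[y], ?_, ?_, by simp, by simpa using hy, ?_, ?_, by simp⟩
    · intro z; rw [pvMemInsert]; simp
    · intro z; rw [pvMemInsert]; simp
    · simpa using pvSizeInsert hy
    · exact (pvMemInsert s y y).mpr (Or.inr rfl)

lemma pvRound_spec {p : Int} (hp : p ≠ 0) :
    ∀ (L : List Int) (s nw : Std.HashSet Int),
      (∀ y ∈ s, y ∈ pvAllowed p) →
      ∃ d : List Int,
        (∀ z, z ∈ (L.foldl (pvStepA p) (s, nw)).1 ↔ z ∈ s ∨ z ∈ d) ∧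
        (∀ z, z ∈ (L.foldl (pvStepA p) (s, nw)).2 ↔ z ∈ nw ∨ z ∈ d) ∧
        d.Nodup ∧ (∀ z ∈ d, z ∉ s) ∧
        (L.foldl (pvStepA p) (s, nw)).1.size = s.size + d.length ∧
        (∀ z ∈ d, z ∈ pvAllowed p) ∧
        (∀ z ∈ d, ∃ x ∈ L, z = PySem.Int.mod (x * 2) p ∨ z = PySem.Int.mod (x * 3) p) ∧
        (∀ x ∈ L, PySem.Int.mod (x * 2) p ∈ (L.foldl (pvStepA p) (s, nw)).1 ∧
          PySem.Int.mod (x * 3) p ∈ (L.foldl (pvStepA p) (s, nw)).1) := by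
  intro L
  induction L with
  | nil =>
    intro s nw _
    exact ⟨[], by simp, by simp, by simp, by simp, by simp, by simp, by simp, by simp⟩
  | cons x L ihL =>
    intro s nw hall
    obtain ⟨d0, m01, m02, n0, f0, s0, y0, z0⟩ :=
      pvTryAdd_spec s nw (PySem.Int.mod (x * 2) p)
    set acc1 := pvTryAdd (s, nw) (PySem.Int.mod (x * 2) p) with hacc1
    obtain ⟨d1, m11, m12, n1, f1, s1, y1, z1⟩ :=
      pvTryAdd_spec acc1.1 acc1.2 (PySem.Int.mod (x * 3) p)
    have hacc2 : pvTryAdd (acc1.1, acc1.2) (PySem.Int.mod (x * 3) p)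
        = pvTryAdd acc1 (PySem.Int.mod (x * 3) p) := by rfl
    rw [hacc2] at m11 m12 s1 y1
    set acc2 := pvTryAdd acc1 (PySem.Int.mod (x * 3) p) with hacc2'
    have hall2 : ∀ y ∈ acc2.1, y ∈ pvAllowed p := by
      intro y hy
      rcases (m11 y).mp hy with h | h
      · rcases (m01 y).mp h with h' | h'
        · exact hall y h'
        · rw [z0 y h']; exact pvMod_mem_allowed hp _
      · rw [z1 y h]; exact pvMod_mem_allowed hp _
    obtain ⟨d2, g1, g2, gn, gf, gs, gall, gprov, gcov⟩ := ihL acc2.1 acc2.2 hall2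
    have hstep : pvStepA p (s, nw) x = acc2 := by rw [pvStepA_eq]
    have hfold : (x :: L).foldl (pvStepA p) (s, nw) = L.foldl (pvStepA p) (acc2.1, acc2.2) := by
      rw [List.foldl_cons, hstep]
    have hmem1 : ∀ z, z ∈ (L.foldl (pvStepA p) (acc2.1, acc2.2)).1 ↔
        z ∈ s ∨ z ∈ d0 ++ d1 ++ d2 := by
      intro z
      rw [g1 z]
      constructor
      · rintro (h | h)
        · rcases (m11 z).mp h with h' | h'
          · rcases (m01 z).mp h' with h'' | h''
            · exact Or.inl h''
            · exact Or.inr (by simp [h''])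
          · exact Or.inr (by simp [h'])
        · exact Or.inr (by simp [h])
      · rintro (h | h)
        · exact Or.inl ((m11 z).mpr (Or.inl ((m01 z).mpr (Or.inl h))))
        · rcases List.mem_append.mp h with h' | h'
          · rcases List.mem_append.mp h' with h'' | h''
            · exact Or.inl ((m11 z).mpr (Or.inl ((m01 z).mpr (Or.inr h''))))
            · exact Or.inl ((m11 z).mpr (Or.inr h''))
          · exact Or.inr h'
    have hmem2 : ∀ z, z ∈ (L.foldl (pvStepA p) (acc2.1, acc2.2)).2 ↔
        z ∈ nw ∨ z ∈ d0 ++ d1 ++ d2 := by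
      intro z
      rw [g2 z]
      constructor
      · rintro (h | h)
        · rcases (m12 z).mp h with h' | h'
          · rcases (m02 z).mp h' with h'' | h''
            · exact Or.inl h''
            · exact Or.inr (by simp [h''])
          · exact Or.inr (by simp [h'])
        · exact Or.inr (by simp [h])
      · rintro (h | h)
        · exact Or.inl ((m12 z).mpr (Or.inl ((m02 z).mpr (Or.inl h))))
        · rcases List.mem_append.mp h with h' | h'
          · rcases List.mem_append.mp h' with h'' | h''
            · exact Or.inl ((m12 z).mpr (Or.inl ((m02 z).mpr (Or.inr h''))))
            · exact Or.inl ((m12 z).mpr (Or.inr h''))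
          · exact Or.inr h'
    have hd1s : ∀ z ∈ d1, z ∉ s ∧ z ∉ d0 := by
      intro z hz
      have := f1 z hz
      constructor
      · intro h; exact this ((m01 z).mpr (Or.inl h))
      · intro h; exact this ((m01 z).mpr (Or.inr h))
    have hd2s : ∀ z ∈ d2, z ∉ s ∧ z ∉ d0 ∧ z ∉ d1 := by
      intro z hz
      have := gf z hz
      refine ⟨fun h => this ((m11 z).mpr (Or.inl ((m01 z).mpr (Or.inl h)))), 
        fun h => this ((m11 z).mpr (Or.inl ((m01 z).mpr (Or.inr h)))), 
        fun h => this ((m11 z).mpr (Or.inr h))⟩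
    refine ⟨d0 ++ d1 ++ d2, ?_, ?_, ?_, ?_, ?_, ?_, ?_, ?_⟩
    · rw [hfold]; exact hmem1
    · rw [hfold]; exact hmem2
    · rw [List.nodup_append, List.nodup_append]
      refine ⟨⟨n0, n1, ?_⟩, gn, ?_⟩
      · intro a ha b hb hab; subst hab; exact (hd1s a hb).2 ha
      · intro a ha b hb hab; subst hab
        rcases List.mem_append.mp ha with h | h
        · exact (hd2s a hb).2.1 h
        · exact (hd2s a hb).2.2 h
    · intro z hz
      rcases List.mem_append.mp hz with h | h
      · rcases List.mem_append.mp h with h' | h'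
        · exact f0 z h'
        · exact (hd1s z h').1
      · exact (hd2s z h).1
    · rw [hfold, gs, s1, s0]
      simp [List.length_append]
      omega
    · intro z hz
      rcases List.mem_append.mp hz with h | h
      · rcases List.mem_append.mp h with h' | h'
        · rw [z0 z h']; exact pvMod_mem_allowed hp _
        · rw [z1 z h']; exact pvMod_mem_allowed hp _
      · exact gall z h
    · intro z hz
      rcases List.mem_append.mp hz with h | h
      · rcases List.mem_append.mp h with h' | h'
        · exact ⟨x, List.mem_cons_self, Or.inl (z0 z h')⟩
        · exact ⟨x, List.mem_cons_self, Or.inr (z1 z h')⟩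
      · obtain ⟨x', hx', h'⟩ := gprov z h
        exact ⟨x', List.mem_cons_of_mem _ hx', h'⟩
    · intro x' hx'
      rcases List.mem_cons.mp hx' with h | h
      · subst h
        rw [hfold]
        constructor
        · refine (hmem1 _).mpr ?_
          rcases (m11 _).mp ((m11 _).mpr (Or.inl y0)) with h' | h'
          · rcases (m01 _).mp h' with h'' | h''
            · exact Or.inl h''
            · exact Or.inr (by simp [h''])
          · exact Or.inr (by simp [h'])
        · refine (hmem1 _).mpr ?_
          rcases (m11 _).mp y1 with h' | h'
          · rcases (m01 _).mp h' with h'' | h''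
            · exact Or.inl h''
            · exact Or.inr (by simp [h''])
          · exact Or.inr (by simp [h'])
      · obtain ⟨c2, c3⟩ := gcov x' h
        rw [hfold]
        exact ⟨c2, c3⟩

lemma pvLoopA_empty (p : Int) (n : Nat) (s f : Std.HashSet Int) (hf : f.isEmpty = true) :
    pvLoopA p n s f = s := by
  cases n with
  | zero => rfl
  | succ n => simp [pvLoopA, hf]

lemma pvLoopA_spec {p : Int} (hp : p ≠ 0) :
    ∀ (n : Nat) (seen frontier : Std.HashSet Int),
      (∀ y ∈ frontier, y ∈ seen) → (∀ y ∈ seen, y ∈ pvAllowed p) →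
      (1 : Int) ∈ seen → (∀ y ∈ seen, pvReach p y) →
      (∀ y ∈ seen, y ∈ frontier ∨
        (PySem.Int.mod (y * 2) p ∈ seen ∧ PySem.Int.mod (y * 3) p ∈ seen)) →
      p.natAbs + 1 < n + seen.size →
      (∀ y, y ∈ pvLoopA p n seen frontier ↔ pvReach p y) := by
  intro n
  induction n with
  | zero =>
    intro seen frontier _ hall _ _ _ hfuel
    have := pvSize_le hall
    omega
  | succ n ih =>
    intro seen frontier hfsub hall h1 hrs hA7 hfuel
    by_cases hfe : frontier.isEmpty = true
    · rw [pvLoopA_empty p (n + 1) seen frontier hfe]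
      have hnomem : ∀ y, y ∉ frontier := Std.HashSet.isEmpty_iff_forall_not_mem.mp hfe
      have hcl2 : ∀ y ∈ seen, PySem.Int.mod (y * 2) p ∈ seen := by
        intro y hy
        rcases hA7 y hy with h | ⟨h2, _⟩
        · exact absurd h (hnomem y)
        · exact h2
      have hcl3 : ∀ y ∈ seen, PySem.Int.mod (y * 3) p ∈ seen := by
        intro y hy
        rcases hA7 y hy with h | ⟨_, h3⟩
        · exact absurd h (hnomem y)
        · exact h3
      exact fun y => ⟨hrs y, pvComplete h1 hcl2 hcl3 y⟩
    · have hstep : pvLoopA p (n + 1) seen frontier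
          = pvLoopA p n (frontier.fold (pvStepA p) (seen, (∅ : Std.HashSet Int))).1
              (frontier.fold (pvStepA p) (seen, (∅ : Std.HashSet Int))).2 := by
        simp only [pvLoopA, hfe, Bool.false_eq_true, if_false]
      have hfoldl : frontier.fold (pvStepA p) (seen, (∅ : Std.HashSet Int))
          = frontier.toList.foldl (pvStepA p) (seen, (∅ : Std.HashSet Int)) :=
        Std.HashSet.fold_eq_foldl_toList
      obtain ⟨d, hm1, hm2, hnd, hdf, hsz, hdall, hprov, hcov⟩ :=
        pvRound_spec hp frontier.toList seen (∅ : Std.HashSet Int) hall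
      set r := frontier.toList.foldl (pvStepA p) (seen, (∅ : Std.HashSet Int)) with hr
      have hLmem : ∀ x, x ∈ frontier.toList ↔ x ∈ frontier := fun x => Std.HashSet.mem_toList
      have hm2' : ∀ z, z ∈ r.2 ↔ z ∈ d := by
        intro z
        rw [hm2 z]
        simp
      -- invariants of the new state
      have hall' : ∀ y ∈ r.1, y ∈ pvAllowed p := by
        intro y hy
        rcases (hm1 y).mp hy with h | h
        · exact hall y h
        · exact hdall y h
      have hrs' : ∀ y ∈ r.1, pvReach p y := by
        intro y hy
        rcases (hm1 y).mp hy with h | h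
        · exact hrs y h
        · obtain ⟨x, hx, hcase⟩ := hprov y h
          have hxr : pvReach p x := hrs x (hfsub x ((hLmem x).mp hx))
          rcases hcase with h' | h'
          · rw [h']; exact pvReach.two hxr
          · rw [h']; exact pvReach.three hxr
      have hsub' : ∀ y ∈ r.2, y ∈ r.1 := by
        intro y hy
        exact (hm1 y).mpr (Or.inr ((hm2' y).mp hy))
      have h1' : (1 : Int) ∈ r.1 := (hm1 1).mpr (Or.inl h1)
      have hA7' : ∀ y ∈ r.1, y ∈ r.2 ∨
          (PySem.Int.mod (y * 2) p ∈ r.1 ∧ PySem.Int.mod (y * 3) p ∈ r.1) := by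
        intro y hy
        rcases (hm1 y).mp hy with h | h
        · rcases hA7 y h with h' | ⟨h2, h3⟩
          · exact Or.inr (hcov y ((hLmem y).mpr h'))
          · exact Or.inr ⟨(hm1 _).mpr (Or.inl h2), (hm1 _).mpr (Or.inl h3)⟩
        · exact Or.inl ((hm2' y).mpr h)
      rw [hstep, hfoldl]
      by_cases hde : d = []
      · -- nothing new: the next frontier is empty and r.1 is already closed
        subst hde
        have hfe2 : r.2.isEmpty = true := by
          refine Std.HashSet.isEmpty_iff_forall_not_mem.mpr ?_
          intro a ha
          simpa using (hm2' a).mp ha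
        rw [pvLoopA_empty p n r.1 r.2 hfe2]
        have hcl2 : ∀ y ∈ r.1, PySem.Int.mod (y * 2) p ∈ r.1 := by
          intro y hy
          rcases hA7' y hy with h | ⟨h2, _⟩
          · exact absurd ((hm2' y).mp h) (by simp)
          · exact h2
        have hcl3 : ∀ y ∈ r.1, PySem.Int.mod (y * 3) p ∈ r.1 := by
          intro y hy
          rcases hA7' y hy with h | ⟨_, h3⟩
          · exact absurd ((hm2' y).mp h) (by simp)
          · exact h3
        exact fun y => ⟨hrs' y, pvComplete h1' hcl2 hcl3 y⟩
      · refine ih r.1 r.2 hsub' hall' h1' hrs' hA7' ?_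
        have : 1 ≤ d.length := by
          cases d with
          | nil => exact absurd rfl hde
          | cons a l => simp
        omega

-- ===== B-side lemmas =====

lemma pvWalkB_spec {p : Int} (hp : p ≠ 0) :
    ∀ (n : Nat) (seen : Std.HashSet Int) (x : Int),
      (∀ y ∈ seen, y ∈ pvAllowed p) → x ∈ pvAllowed p →
      p.natAbs + 1 < n + seen.size →
      (∀ y ∈ seen, y ∈ pvWalkB p n seen x) ∧
      (∀ y ∈ pvWalkB p n seen x, y ∈ pvAllowed p) ∧
      x ∈ pvWalkB p n seen x ∧
      (∀ y ∈ pvWalkB p n seen x, y ∈ seen ∨ ∃ a : Nat, y = (pvF2 p)^[a] x) ∧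
      (∀ y ∈ pvWalkB p n seen x, y ∈ seen ∨ pvF2 p y ∈ pvWalkB p n seen x) ∧
      ((∀ y ∈ seen, pvReach p y) → pvReach p x → ∀ y ∈ pvWalkB p n seen x, pvReach p y) := by
  intro n
  induction n with
  | zero =>
    intro seen x hall _hxall hfuel
    have := pvSize_le hall
    omega
  | succ n ih =>
    intro seen x hall hxall hfuel
    by_cases hx : x ∈ seen
    · have hc : seen.contains x = true := Std.HashSet.contains_iff_mem.mpr hx
      have hstep : pvWalkB p (n + 1) seen x = seen := by simp [pvWalkB, hc]
      rw [hstep]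
      exact ⟨fun y hy => hy, hall, hx, fun y hy => Or.inl hy, fun y hy => Or.inl hy,
        fun hr _ y hy => hr y hy⟩
    · have hc : seen.contains x = false := by
        simpa using fun h => hx (Std.HashSet.contains_iff_mem.mp h)
      have hstep : pvWalkB p (n + 1) seen x
          = pvWalkB p n (seen.insert x) (PySem.Int.mod (x * 2) p) := by
        simp [pvWalkB, hc]
      have hmemadd : ∀ y, y ∈ seen.insert x ↔ y ∈ seen ∨ y = x := pvMemInsert seen x
      obtain ⟨Sub, All, Xin, Dec, Cl, Rch⟩ :=
        ih (seen.insert x) (PySem.Int.mod (x * 2) p)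
          (by intro y hy; rcases (hmemadd y).mp hy with h | h
              · exact hall y h
              · subst h; exact hxall)
          (pvMod_mem_allowed hp _)
          (by rw [pvSizeInsert hx]; omega)
      rw [hstep]
      refine ⟨?_, All, ?_, ?_, ?_, ?_⟩
      · intro y hy; exact Sub y ((hmemadd y).mpr (Or.inl hy))
      · exact Sub x ((hmemadd x).mpr (Or.inr rfl))
      · intro y hy
        rcases Dec y hy with h | ⟨a, ha⟩
        · rcases (hmemadd y).mp h with h' | h'
          · exact Or.inl h'
          · exact Or.inr ⟨0, by simpa using h'⟩
        · exact Or.inr ⟨a + 1, by rw [ha, Function.iterate_succ_apply]; rfl⟩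
      · intro y hy
        rcases Cl y hy with h | h
        · rcases (hmemadd y).mp h with h' | h'
          · exact Or.inl h'
          · subst h'; exact Or.inr Xin
        · exact Or.inr h
      · intro hr hx2 y hy
        refine Rch ?_ (pvReach.two hx2) y hy
        intro z hz
        rcases (hmemadd z).mp hz with h | h
        · exact hr z h
        · subst h; exact hx2

lemma pvLoopB_spec {p : Int} (hp : p ≠ 0) :
    ∀ (n : Nat) (seen starts : Std.HashSet Int) (t : Int),
      (∀ y ∈ seen, y ∈ pvAllowed p) → (∀ y ∈ starts, y ∈ pvAllowed p) →
      t ∈ pvAllowed p →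
      (∀ s ∈ starts, s ∈ seen) →
      (starts.isEmpty = true → t = 1) → (starts.isEmpty = false → (1 : Int) ∈ starts) →
      pvReach p t → (∀ y ∈ seen, pvReach p y) →
      (∀ s ∈ starts, PySem.Int.mod (s * 3) p ∈ starts ∨ PySem.Int.mod (s * 3) p = t) →
      (∀ y ∈ seen, pvF2 p y ∈ seen) →
      (∀ y ∈ seen, ∃ s ∈ starts, ∃ a : Nat, y = (pvF2 p)^[a] s) →
      p.natAbs + 1 < n + starts.size →
      (∀ y, y ∈ pvLoopB p n seen starts t ↔ pvReach p y) := by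
  intro n
  induction n with
  | zero =>
    intro seen starts t _ hallst _ _ _ _ _ _ _ _ _ hfuel
    have := pvSize_le hallst
    omega
  | succ n ih =>
    intro seen starts t halls hallst htall hsub h0 h1 hrt hrs hO6 hcl hdec hfuel
    by_cases ht : t ∈ starts
    · have hc : starts.contains t = true := Std.HashSet.contains_iff_mem.mpr ht
      have hstep : pvLoopB p (n + 1) seen starts t = seen := by
        simp [pvLoopB, hc]
      rw [hstep]
      have hne : starts.isEmpty = false := by
        rcases Bool.eq_false_or_eq_true starts.isEmpty with h | h
        · exact absurd ht (Std.HashSet.isEmpty_iff_forall_not_mem.mp h t)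
        · exact h
      have h1s : (1 : Int) ∈ seen := hsub 1 (h1 hne)
      have hcl2 : ∀ y ∈ seen, PySem.Int.mod (y * 2) p ∈ seen := hcl
      have hcl3 : ∀ y ∈ seen, PySem.Int.mod (y * 3) p ∈ seen := by
        intro y hy
        obtain ⟨s0, hs0, a, ha⟩ := hdec y hy
        rw [ha, pvM3_iter2 hp]
        have hm3 : PySem.Int.mod (s0 * 3) p ∈ starts := by
          rcases hO6 s0 hs0 with h | h
          · exact h
          · rw [h]; exact ht
        exact pvIter2_mem hcl (hsub _ hm3) a
      exact fun y => ⟨hrs y, pvComplete h1s hcl2 hcl3 y⟩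
    · have hc : starts.contains t = false := by
        simpa using fun h => ht (Std.HashSet.contains_iff_mem.mp h)
      have hstep : pvLoopB p (n + 1) seen starts t
          = pvLoopB p n (pvWalkB p (p.natAbs + 2) seen t)
              (starts.insert t) (PySem.Int.mod (t * 3) p) := by
        simp [pvLoopB, hc]
      obtain ⟨WSub, WAll, WXin, WDec, WCl, WRch⟩ :=
        pvWalkB_spec hp (p.natAbs + 2) seen t halls htall (by omega)
      have hmemadd : ∀ y, y ∈ starts.insert t ↔ y ∈ starts ∨ y = t := pvMemInsert starts t
      rw [hstep]
      refine ih (pvWalkB p (p.natAbs + 2) seen t) (starts.insert t)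
        (PySem.Int.mod (t * 3) p) WAll ?_ (pvMod_mem_allowed hp _) ?_ ?_ ?_
        (pvReach.three hrt) (WRch hrs hrt) ?_ ?_ ?_ ?_
      · intro y hy
        rcases (hmemadd y).mp hy with h | h
        · exact hallst y h
        · subst h; exact htall
      · intro y hy
        rcases (hmemadd y).mp hy with h | h
        · exact WSub y (hsub y h)
        · subst h; exact WXin
      · intro h
        have := Std.HashSet.isEmpty_iff_forall_not_mem.mp h t
        exact absurd ((hmemadd t).mpr (Or.inr rfl)) this
      · intro _
        rcases Bool.eq_false_or_eq_true starts.isEmpty with he | he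
        · exact (hmemadd 1).mpr (Or.inr (h0 he).symm)
        · exact (hmemadd 1).mpr (Or.inl (h1 he))
      · intro s0 hs0
        rcases (hmemadd s0).mp hs0 with h | h
        · rcases hO6 s0 h with h' | h'
          · exact Or.inl ((hmemadd _).mpr (Or.inl h'))
          · exact Or.inl ((hmemadd _).mpr (Or.inr h'))
        · subst h; exact Or.inr rfl
      · intro y hy
        rcases WCl y hy with h | h
        · exact WSub _ (hcl y h)
        · exact h
      · intro y hy
        rcases WDec y hy with h | ⟨a, ha⟩
        · obtain ⟨s0, hs0, a, ha⟩ := hdec y h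
          exact ⟨s0, (hmemadd s0).mpr (Or.inl hs0), a, ha⟩
        · exact ⟨t, (hmemadd t).mpr (Or.inr rfl), a, ha⟩
      · rw [pvSizeInsert ht]; omega

lemma pvSize_eq_of_same_mem (s t : Std.HashSet Int) (h : ∀ y, y ∈ s ↔ y ∈ t) :
    s.size = t.size := by
  rw [← Std.HashSet.length_toList, ← Std.HashSet.length_toList]
  refine List.Perm.length_eq ?_
  rw [List.perm_ext_iff_of_nodup (pvToList_nodup s) (pvToList_nodup t)]
  intro a
  rw [Std.HashSet.mem_toList, Std.HashSet.mem_toList]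
  exact h a

-- ===== VERDICT (by name: the statement is the Claim_ definition above) =====
theorem subgroup_size_spec : Claim_equal_subgroup_size := by
  intro p _hdom hp
  unfold Spec_subgroup_size subgroup_size subgroup_size_alt
  have hm1 : ∀ y : Int, y ∈ (∅ : Std.HashSet Int).insert 1 ↔ y = 1 := by
    intro y
    rw [pvMemInsert]
    simp
  have hAm := pvLoopA_spec hp (p.natAbs + 2) ((∅ : Std.HashSet Int).insert 1)
    ((∅ : Std.HashSet Int).insert 1)
    (fun y hy => hy)
    (by intro y hy; rw [(hm1 y).mp hy]; exact pvOne_mem_allowed p)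
    ((hm1 1).mpr rfl)
    (by intro y hy; rw [(hm1 y).mp hy]; exact pvReach.one)
    (by intro y hy; exact Or.inl hy)
    (by have : ((∅ : Std.HashSet Int).insert 1).size = 1 := by
          rw [pvSizeInsert (by simp), Std.HashSet.size_empty]
        omega)
  have hBm := pvLoopB_spec hp (p.natAbs + 2) (∅ : Std.HashSet Int) (∅ : Std.HashSet Int) 1
    (by intro y hy; simp at hy) (by intro y hy; simp at hy) (pvOne_mem_allowed p)
    (by intro s hs; simp at hs) (fun _ => rfl)
    (by intro h; simp at h)
    pvReach.one (by intro y hy; simp at hy)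
    (by intro s hs; simp at hs) (by intro y hy; simp at hy) (by intro y hy; simp at hy)
    (by rw [Std.HashSet.size_empty]; omega)
  have := pvSize_eq_of_same_mem _ _ (fun y => (hAm y).trans (hBm y).symm)
  exact_mod_cast congrArg (fun n : Nat => (n : Int)) this
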